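-- pv_equiv track=rewrite | github.com/eappleton/cellarchitect | mesh/tetMeshing2.py | fixIndices
-- ===== SOURCE A (Python) =====
-- def fixIndices(adjacency,maxIndex):
--     mapping={-1:-1}
--     offset=0
--     for i in range(maxIndex):
--         if i in adjacency:
--             mapping[i]=i-offset
--         else:
--             offset+=1
--     adjacency2=dict()
--     for tet in adjacency:
--         adjacency2[mapping[tet]]=[mapping[x] for x in adjacency[tet]]
--     return adjacency2
-- ===== SOURCE B (Python) =====
-- def fixIndices(adjacency, maxIndex):
--     present = sorted(k for k in adjacency if 0 <= k < maxIndex)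
--     mapping = {-1: -1}
--     for rank, key in enumerate(present):
--         mapping[key] = rank
--     return {mapping[tet]: [mapping[x] for x in adjacency[tet]] for tet in adjacency}
-- ===== Notes on version B (the rewrite author's own statement) =====
-- stated objective: simpler
-- what changed: Instead of scanning every integer in range(maxIndex) while maintaining a running offset of absent indices, B sorts the present keys once and assigns each its enumeration rank (which equals i - offset), then builds the result by a single dict comprehension.
import Mathlib
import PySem

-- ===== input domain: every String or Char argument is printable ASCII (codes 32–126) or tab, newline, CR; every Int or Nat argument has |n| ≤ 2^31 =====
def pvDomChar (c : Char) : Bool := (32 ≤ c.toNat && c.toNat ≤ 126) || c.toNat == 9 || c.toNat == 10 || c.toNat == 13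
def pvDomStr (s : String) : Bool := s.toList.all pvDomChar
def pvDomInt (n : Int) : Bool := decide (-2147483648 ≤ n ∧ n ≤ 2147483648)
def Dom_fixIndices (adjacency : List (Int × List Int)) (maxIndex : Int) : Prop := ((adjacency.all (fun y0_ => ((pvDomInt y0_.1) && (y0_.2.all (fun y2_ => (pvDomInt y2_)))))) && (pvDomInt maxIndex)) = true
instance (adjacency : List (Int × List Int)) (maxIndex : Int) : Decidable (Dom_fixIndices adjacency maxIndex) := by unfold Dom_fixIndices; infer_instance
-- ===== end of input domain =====

-- B replaces A's scan of every integer in range(maxIndex) (with a running offset of the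
-- absent ones) by sorting the present keys once and using each key's enumeration rank;
-- objective: simpler.

-- shared stand-in for Python's mapping[k] (a KeyError, i.e. a missing key, is excluded by Pre_)
def mget (m : PySem.Dict Int Int) (k : Int) : Int := (m.get? k).getD 0

-- ===== PORT A =====
-- NOTE: iterating 'for tet in adjacency' over the dict yields each key in order together with
-- its value: on the items list that is the pair tet itself, so adjacency[tet] is tet.2.
def fixIndices (adjacency : List (Int × List Int)) (maxIndex : Int) : List (Int × List Int) :=
  let keys := adjacency.map Prod.fst
  let st := (PySem.List.pyRange 0 maxIndex 1).foldl
      (fun (st : PySem.Dict Int Int × Int) i =>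
        if keys.contains i then (st.1.insert i (i - st.2), st.2) else (st.1, st.2 + 1))
      ((PySem.Dict.empty.insert (-1) (-1)), 0)
  let mapping := st.1
  (adjacency.foldl
      (fun (d : PySem.Dict Int (List Int)) tet =>
        d.insert (mget mapping tet.1) (tet.2.map (mget mapping)))
      PySem.Dict.empty).items

-- ===== PORT B =====
def fixIndices_alt (adjacency : List (Int × List Int)) (maxIndex : Int) : List (Int × List Int) :=
  let present := PySem.List.sorted
      ((adjacency.map Prod.fst).filter (fun y => decide (0 ≤ y) && decide (y < maxIndex)))
      (fun x => x) false
  let mapping := (PySem.List.enumerate present 0).foldl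
      (fun (m : PySem.Dict Int Int) p => m.insert p.2 p.1)
      (PySem.Dict.empty.insert (-1) (-1))
  (adjacency.foldl
      (fun (d : PySem.Dict Int (List Int)) tet =>
        d.insert (mget mapping tet.1) (tet.2.map (mget mapping)))
      PySem.Dict.empty).items

-- ===== PRECONDITION & SPEC =====
-- Pre_ excludes (a) assoc lists with duplicate keys, which do not represent a Python dict
-- (the argument's type), and (b) inputs where some key or adjacency value is neither -1 nor
-- in [0, maxIndex): there mapping[...] raises KeyError in both A and B.
def Pre_fixIndices (adjacency : List (Int × List Int)) (maxIndex : Int) : Prop :=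
  (adjacency.map Prod.fst).Nodup ∧
  ∀ p ∈ adjacency,
    (p.1 = -1 ∨ (0 ≤ p.1 ∧ p.1 < maxIndex)) ∧
    ∀ x ∈ p.2, x = -1 ∨ (0 ≤ x ∧ x < maxIndex ∧ x ∈ adjacency.map Prod.fst)
instance (adjacency : List (Int × List Int)) (maxIndex : Int) : Decidable (Pre_fixIndices adjacency maxIndex) := by unfold Pre_fixIndices; infer_instance

def pvWitness_fixIndices : (List (Int × List Int)) × Int := ([(-1, [0]), (0, [-1, 0]), (2, [2, 0])], 3)

def Spec_fixIndices (adjacency : List (Int × List Int)) (maxIndex : Int) (out : List (Int × List Int)) : Prop := out = fixIndices_alt adjacency maxIndex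
instance (adjacency : List (Int × List Int)) (maxIndex : Int) (out : List (Int × List Int)) : Decidable (Spec_fixIndices adjacency maxIndex out) := by unfold Spec_fixIndices; infer_instance

-- ===== CLAIM (what is proved, stated in full; the proofs are below) =====
def Claim_equal_fixIndices : Prop := ∀ (adjacency : List (Int × List Int)) (maxIndex : Int), Dom_fixIndices adjacency maxIndex → Pre_fixIndices adjacency maxIndex → Spec_fixIndices adjacency maxIndex (fixIndices adjacency maxIndex)

-- ===== LEMMAS AND PROOFS =====

-- A's mapping loop over range(0, n): offset and lookup characterization.
theorem loopA_char (keys : List Int) (n : Nat) :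
    ((PySem.List.pyRange 0 n 1).foldl
      (fun (st : PySem.Dict Int Int × Int) i =>
        if keys.contains i then (st.1.insert i (i - st.2), st.2) else (st.1, st.2 + 1))
      ((PySem.Dict.empty.insert (-1) (-1)), 0)).2
      = (n : Int) - (((PySem.List.pyRange 0 n 1).countP (fun i => keys.contains i) : Nat) : Int)
    ∧ ∀ k : Int,
      ((PySem.List.pyRange 0 n 1).foldl
        (fun (st : PySem.Dict Int Int × Int) i =>
          if keys.contains i then (st.1.insert i (i - st.2), st.2) else (st.1, st.2 + 1))
        ((PySem.Dict.empty.insert (-1) (-1)), 0)).1.get? k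
      = if 0 ≤ k ∧ k < (n : Int) ∧ keys.contains k then
          some ((((PySem.List.pyRange 0 k 1).countP (fun i => keys.contains i) : Nat) : Int))
        else (PySem.Dict.empty.insert (-1) (-1)).get? k := by
  induction n with
  | zero =>
    refine ⟨by simp [PySem.List.pyRange_one_eq_nil], ?_⟩
    intro k
    have hno : ¬(0 ≤ k ∧ k < ((0 : Nat) : Int) ∧ keys.contains k = true) := by
      rintro ⟨h1, h2, -⟩; simp at h2; omega
    rw [if_neg hno]
    simp [PySem.List.pyRange_one_eq_nil]
  | succ n ih =>
    obtain ⟨ihoff, ihget⟩ := ih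
    have hcast : ((n + 1 : Nat) : Int) = (n : Int) + 1 := by push_cast; ring
    rw [hcast, PySem.List.pyRange_one_succ_right (Int.natCast_nonneg n)]
    simp only [List.foldl_append, List.foldl_cons, List.foldl_nil,
      List.countP_append, List.countP_cons, List.countP_nil]
    by_cases hc : keys.contains (n : Int) = true
    · rw [if_pos hc]
      refine ⟨?_, ?_⟩
      · dsimp only
        rw [ihoff]
        simp only [hc, if_true]
        push_cast
        omega
      · intro k
        dsimp only
        rw [PySem.Dict.get?_insert, ihoff]
        by_cases hkn : k = (n : Int)
        · subst hkn
          rw [if_pos rfl, if_pos ⟨Int.natCast_nonneg n, by omega, hc⟩]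
          exact congrArg some (by omega)
        · rw [if_neg hkn, ihget k]
          by_cases hck : keys.contains k = true
          · by_cases hkr : 0 ≤ k ∧ k < (n : Int)
            · rw [if_pos ⟨hkr.1, hkr.2, hck⟩, if_pos ⟨hkr.1, by omega, hck⟩]
            · rw [if_neg (by rintro ⟨a, b, -⟩; exact hkr ⟨a, b⟩),
                if_neg (by rintro ⟨a, b, -⟩; exact hkr ⟨a, by omega⟩)]
          · rw [if_neg (by rintro ⟨-, -, h⟩; exact hck h),
              if_neg (by rintro ⟨-, -, h⟩; exact hck h)]
    · rw [if_neg hc]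
      have hcf : keys.contains (n : Int) = false := by
        simpa using hc
      refine ⟨?_, ?_⟩
      · dsimp only
        rw [ihoff]
        simp only [hcf]
        push_cast
        omega
      · intro k
        dsimp only
        rw [ihget k]
        by_cases hkn : k = (n : Int)
        · subst hkn
          rw [if_neg (by rintro ⟨-, h, -⟩; omega),
            if_neg (by rintro ⟨-, -, h⟩; exact hc h)]
        · by_cases hck : keys.contains k = true
          · by_cases hkr : 0 ≤ k ∧ k < (n : Int)
            · rw [if_pos ⟨hkr.1, hkr.2, hck⟩, if_pos ⟨hkr.1, by omega, hck⟩]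
            · rw [if_neg (by rintro ⟨a, b, -⟩; exact hkr ⟨a, b⟩),
                if_neg (by rintro ⟨a, b, -⟩; exact hkr ⟨a, by omega⟩)]
          · rw [if_neg (by rintro ⟨-, -, h⟩; exact hck h),
              if_neg (by rintro ⟨-, -, h⟩; exact hck h)]

-- B's mapping loop: inserting rank ↦ key over an enumerated strictly increasing list.
theorem loopB_char (xs : List Int) (hs : xs.Pairwise (· < ·)) (s : Int)
    (m : PySem.Dict Int Int) (k : Int) :
    ((PySem.List.enumerate xs s).foldl
      (fun (m : PySem.Dict Int Int) p => m.insert p.2 p.1) m).get? k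
    = if k ∈ xs then some (s + ((xs.countP (fun y => decide (y < k)) : Nat) : Int))
      else m.get? k := by
  induction xs generalizing s m with
  | nil => simp [PySem.List.enumerate]
  | cons x xs ih =>
    have hlt : ∀ y ∈ xs, x < y := (List.pairwise_cons.mp hs).1
    have htail : xs.Pairwise (· < ·) := (List.pairwise_cons.mp hs).2
    have hcons : PySem.List.enumerate (x :: xs) s
        = (s, x) :: PySem.List.enumerate xs (s + 1) := by
      simp [PySem.List.enumerate]
    rw [hcons, List.foldl_cons, ih htail (s + 1)]
    by_cases hk : k ∈ x :: xs
    · rcases List.mem_cons.mp hk with rfl | hkxs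
      · have hxnot : k ∉ xs := fun h => lt_irrefl k (hlt k h)
        rw [if_neg hxnot, if_pos hk, PySem.Dict.get?_insert, if_pos rfl]
        have hcnt : (k :: xs).countP (fun y => decide (y < k)) = 0 := by
          rw [List.countP_eq_zero]
          intro a ha
          rcases List.mem_cons.mp ha with rfl | haxs
          · simp
          · simp only [decide_eq_true_eq]
            exact not_lt.mpr (le_of_lt (hlt a haxs))
        rw [hcnt]
        exact congrArg some (by push_cast; omega)
      · have hxk : x < k := hlt k hkxs
        rw [if_pos hkxs, if_pos hk]
        have hcnt : (x :: xs).countP (fun y => decide (y < k))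
            = xs.countP (fun y => decide (y < k)) + 1 := by
          rw [List.countP_cons]
          simp [hxk]
        rw [hcnt]
        exact congrArg some (by push_cast; omega)
    · have hk1 : k ∉ xs := fun h => hk (List.mem_cons_of_mem x h)
      have hk2 : k ≠ x := fun h => hk (h ▸ List.mem_cons_self)
      rw [if_neg hk1, if_neg hk, PySem.Dict.get?_insert, if_neg hk2]

-- counting the present keys below k two ways
theorem count_bridge (keys : List Int) (hnd : keys.Nodup) (maxIndex k : Int)
    (_hk0 : 0 ≤ k) (hk : k ≤ maxIndex) :
    (keys.filter (fun y => decide (0 ≤ y) && decide (y < maxIndex))).countP (fun y => decide (y < k))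
    = (PySem.List.pyRange 0 k 1).countP (fun i => keys.contains i) := by
  rw [List.countP_eq_length_filter, List.countP_eq_length_filter]
  apply List.Perm.length_eq
  rw [List.perm_ext_iff_of_nodup
    (((hnd.filter _).filter _))
    ((PySem.List.nodup_pyRange_one 0 k).filter _)]
  intro a
  simp only [List.mem_filter, PySem.List.mem_pyRange_one, List.contains_iff_mem,
    Bool.and_eq_true, decide_eq_true_eq]
  constructor
  · rintro ⟨⟨ha, hb1, hb2⟩, hcc⟩
    exact ⟨⟨by omega, by omega⟩, ha⟩
  · rintro ⟨⟨ha1, ha2⟩, hmem⟩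
    exact ⟨⟨hmem, by omega, by omega⟩, by omega⟩

-- the two mappings agree on every key the final loop looks up
theorem mapping_agree (adjacency : List (Int × List Int)) (maxIndex : Int)
    (hnd : (adjacency.map Prod.fst).Nodup) (k : Int)
    (hk : k = -1 ∨ (0 ≤ k ∧ k < maxIndex ∧ k ∈ adjacency.map Prod.fst)) :
    ((PySem.List.pyRange 0 maxIndex 1).foldl
      (fun (st : PySem.Dict Int Int × Int) i =>
        if (adjacency.map Prod.fst).contains i then (st.1.insert i (i - st.2), st.2) else (st.1, st.2 + 1))
      ((PySem.Dict.empty.insert (-1) (-1)), 0)).1.get? k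
    = ((PySem.List.enumerate (PySem.List.sorted
          ((adjacency.map Prod.fst).filter (fun y => decide (0 ≤ y) && decide (y < maxIndex)))
          (fun x => x) false) 0).foldl
        (fun (m : PySem.Dict Int Int) p => m.insert p.2 p.1)
        (PySem.Dict.empty.insert (-1) (-1))).get? k := by
  set keys := adjacency.map Prod.fst with hkeys
  set present := PySem.List.sorted (keys.filter (fun y => decide (0 ≤ y) && decide (y < maxIndex)))
      (fun x => x) false with hpresent
  have hperm : present.Perm (keys.filter (fun y => decide (0 ≤ y) && decide (y < maxIndex))) :=
    PySem.List.sorted_perm _ _ _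
  have hpnd : present.Nodup := hperm.nodup_iff.mpr (hnd.filter _)
  have hle : present.Pairwise (· ≤ ·) := by
    simpa using PySem.List.sorted_pairwise
      (keys.filter (fun y => decide (0 ≤ y) && decide (y < maxIndex))) (fun x => x)
  have hlt : present.Pairwise (· < ·) := by
    have := List.Pairwise.and hle hpnd
    exact this.imp (fun h => lt_of_le_of_ne h.1 h.2)
  rw [loopB_char present hlt 0 _ k]
  rcases hk with rfl | ⟨h0, h1, hmem⟩
  · have hnot : (-1 : Int) ∉ present := by
      intro h
      have h2 := (PySem.List.mem_sorted _ _ _ _).mp h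
      rw [List.mem_filter] at h2
      simp at h2
    rw [if_neg hnot]
    by_cases hmi : maxIndex ≤ 0
    · rw [PySem.List.pyRange_one_eq_nil hmi]
      rfl
    · have hmi' : 0 < maxIndex := by omega
      have hn := (loopA_char keys maxIndex.toNat).2 (-1)
      have hcast : ((maxIndex.toNat : Nat) : Int) = maxIndex := Int.toNat_of_nonneg (le_of_lt hmi')
      rw [hcast] at hn
      rw [hn, if_neg (by rintro ⟨h, -⟩; omega)]
  · have hmemp : k ∈ present := by
      rw [hpresent, PySem.List.mem_sorted, List.mem_filter]
      refine ⟨hmem, ?_⟩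
      simp only [Bool.and_eq_true, decide_eq_true_eq]
      omega
    rw [if_pos hmemp]
    have hn := (loopA_char keys maxIndex.toNat).2 k
    have hcast : ((maxIndex.toNat : Nat) : Int) = maxIndex := Int.toNat_of_nonneg (by omega)
    rw [hcast] at hn
    rw [hn, if_pos ⟨h0, h1, List.contains_iff_mem.mpr hmem⟩]
    have hc2 : present.countP (fun y => decide (y < k))
        = (PySem.List.pyRange 0 k 1).countP (fun i => keys.contains i) := by
      rw [hperm.countP_eq]
      exact count_bridge keys hnd maxIndex k h0 (le_of_lt h1)
    rw [hc2]
    exact congrArg some (by omega)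

-- ===== VERDICT (by name: the statement is the Claim_ definition above) =====
theorem fixIndices_spec : Claim_equal_fixIndices := by
  intro adjacency maxIndex _hD hP
  obtain ⟨hnd, hall⟩ := hP
  unfold Spec_fixIndices
  simp only [fixIndices, fixIndices_alt]
  apply congrArg PySem.Dict.items
  apply PySem.List.foldl_congr_mem
  intro acc tet htet
  have hagree : ∀ k : Int, (k = -1 ∨ (0 ≤ k ∧ k < maxIndex ∧ k ∈ adjacency.map Prod.fst)) →
      mget ((PySem.List.pyRange 0 maxIndex 1).foldl
        (fun (st : PySem.Dict Int Int × Int) i =>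
          if (adjacency.map Prod.fst).contains i then (st.1.insert i (i - st.2), st.2) else (st.1, st.2 + 1))
        ((PySem.Dict.empty.insert (-1) (-1)), 0)).1 k
      = mget ((PySem.List.enumerate (PySem.List.sorted
            ((adjacency.map Prod.fst).filter (fun y => decide (0 ≤ y) && decide (y < maxIndex)))
            (fun x => x) false) 0).foldl
          (fun (m : PySem.Dict Int Int) p => m.insert p.2 p.1)
          (PySem.Dict.empty.insert (-1) (-1))) k := by
    intro k hk
    unfold mget
    rw [mapping_agree adjacency maxIndex hnd k hk]
  have hkey := hagree tet.1 (by
    rcases (hall tet htet).1 with h | h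
    · exact Or.inl h
    · exact Or.inr ⟨h.1, h.2, List.mem_map_of_mem htet⟩)
  have hval : tet.2.map (mget _) = tet.2.map (mget _) :=
    List.map_congr_left (fun x hx => hagree x ((hall tet htet).2 x hx))
  rw [hkey, hval]
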